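-- pv_equiv track=rewrite | github.com/Joel-ASantos/EigenvalueAndEigenvectorsProblem | Problem/main.py | A_Menos_lambda
-- ===== SOURCE A (Python) =====
-- def A_Menos_lambda(M,lamb):
--     n = len(M)
--     M_lambda = []
--
--     for i in range(n):
--         linha = []
--         for j in range(n):
--             if i == j:
--                 value = M[i][j]-lamb
--             else:
--                 value = M[i][j]
--             linha.append(value)
--         M_lambda.append(linha)
--     return M_lambda
-- ===== SOURCE B (Python) =====
-- def A_Menos_lambda(M, lamb):
--     n = len(M)
--
--     def go(rows):
--         # subtract lamb along the main diagonal of the square block `rows`,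
--         # by recursion on the leading principal submatrix
--         if not rows:
--             return []
--         first = rows[0]
--         rest = rows[1:]
--         sub = go([r[1:] for r in rest])
--         out = [[first[0] - lamb] + first[1:]]
--         for r, s in zip(rest, sub):
--             out.append([r[0]] + s)
--         return out
--
--     return go([row[:n] for row in M])
-- ===== Notes on version B (the rewrite author's own statement) =====
-- stated objective: alternative
-- what changed: B replaces A's nested index loops with an i==j branch by index-free recursion on the leading principal submatrix: it peels the first row and first column, recurses on the trailing (n-1)x(n-1) block, and reattaches them, subtracting lambda only from each peeled corner entry.
import Mathlib
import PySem

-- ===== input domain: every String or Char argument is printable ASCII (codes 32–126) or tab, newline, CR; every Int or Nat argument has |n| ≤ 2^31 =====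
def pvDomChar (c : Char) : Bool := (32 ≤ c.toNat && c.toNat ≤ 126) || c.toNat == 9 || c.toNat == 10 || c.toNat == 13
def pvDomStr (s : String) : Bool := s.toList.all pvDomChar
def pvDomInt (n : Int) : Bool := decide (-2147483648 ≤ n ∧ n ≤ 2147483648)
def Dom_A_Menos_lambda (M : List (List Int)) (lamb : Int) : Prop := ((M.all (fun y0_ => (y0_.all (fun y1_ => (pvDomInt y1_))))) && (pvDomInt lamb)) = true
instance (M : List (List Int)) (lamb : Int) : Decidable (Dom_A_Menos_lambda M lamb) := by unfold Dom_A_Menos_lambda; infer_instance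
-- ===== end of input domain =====

-- B computes A - lambda*I by index-free recursion on the leading principal submatrix
-- (peel first row/column, recurse, reattach) instead of A's nested i/j loop with an i==j branch.

-- ===== PORT A =====
-- M[i][j] ported with pyGetD: exact under Pre_ (all indices in range); outside Pre_
-- Python raises IndexError and those inputs are excluded.
def A_Menos_lambda (M : List (List Int)) (lamb : Int) : List (List Int) :=
  let n : Int := M.length
  (PySem.List.pyRange 0 n 1).foldl (fun M_lambda i =>
    let linha := (PySem.List.pyRange 0 n 1).foldl (fun linha j =>
      let value :=
        if i == j then PySem.List.pyGetD (PySem.List.pyGetD M i []) j 0 - lamb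
        else PySem.List.pyGetD (PySem.List.pyGetD M i []) j 0
      linha ++ [value]) ([] : List Int)
    M_lambda ++ [linha]) ([] : List (List Int))

-- ===== PORT B =====
-- r[0] ported with pyGetD: exact under Pre_ (every block row nonempty there).
def pvGoB (lamb : Int) : List (List Int) → List (List Int)
  | [] => []
  | first :: rest =>
    let sub := pvGoB lamb (rest.map (fun r => PySem.List.slice r (some (1 : Int)) none))
    ((PySem.List.pyGetD first (0 : Int) 0 - lamb) :: PySem.List.slice first (some (1 : Int)) none) ::
      List.zipWith (fun r s => PySem.List.pyGetD r (0 : Int) 0 :: s) rest sub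
termination_by rows => rows.length
decreasing_by simp

def A_Menos_lambda_alt (M : List (List Int)) (lamb : Int) : List (List Int) :=
  let n := M.length
  pvGoB lamb (M.map (fun row => PySem.List.slice row none (some (n : Int))))

-- ===== PRECONDITION & SPEC =====
-- Pre_ holds exactly when every row has at least len(M) entries: otherwise the Python A
-- raises IndexError at M[i][j].
def Pre_A_Menos_lambda (M : List (List Int)) (lamb : Int) : Prop :=
  ∀ row ∈ M, M.length ≤ row.length
instance (M : List (List Int)) (lamb : Int) : Decidable (Pre_A_Menos_lambda M lamb) := by unfold Pre_A_Menos_lambda; infer_instance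

def pvWitness_A_Menos_lambda : List (List Int) × Int := ([[1, 2], [3, 4]], 5)

def Spec_A_Menos_lambda (M : List (List Int)) (lamb : Int) (out : List (List Int)) : Prop := out = A_Menos_lambda_alt M lamb
instance (M : List (List Int)) (lamb : Int) (out : List (List Int)) : Decidable (Spec_A_Menos_lambda M lamb out) := by unfold Spec_A_Menos_lambda; infer_instance

-- ===== CLAIM =====
def Claim_equal_A_Menos_lambda : Prop := ∀ (M : List (List Int)) (lamb : Int), Dom_A_Menos_lambda M lamb → Pre_A_Menos_lambda M lamb → Spec_A_Menos_lambda M lamb (A_Menos_lambda M lamb)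

-- ===== LEMMAS AND PROOFS =====

-- A's double append-fold is a double map over range n.
theorem A_eq_map (M : List (List Int)) (lamb : Int) :
    A_Menos_lambda M lamb =
      (List.range M.length).map (fun (i : Nat) =>
        (List.range M.length).map (fun (j : Nat) =>
          if i = j then PySem.List.pyGetD (PySem.List.pyGetD M (i : Int) []) (j : Int) 0 - lamb
          else PySem.List.pyGetD (PySem.List.pyGetD M (i : Int) []) (j : Int) 0)) := by
  simp only [A_Menos_lambda, PySem.List.foldl_append_singleton_eq_map, List.nil_append,
    PySem.List.pyRange_zero_natCast, List.map_map]
  refine List.map_congr_left (fun i _ => ?_)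
  refine List.map_congr_left (fun j hj => ?_)
  simp [Function.comp]

-- the staircase characterisation of B's recursion: on a block whose i-th row has
-- more than i entries, pvGoB subtracts lamb at the i-th position of the i-th row.
theorem pvGoB_eq_mapIdx_aux (lamb : Int) (n : Nat) : ∀ (rows : List (List Int)),
    rows.length = n → (∀ i (hi : i < rows.length), i < rows[i].length) →
    pvGoB lamb rows = rows.mapIdx (fun i r => r.modify i (fun v => v - lamb)) := by
  induction n with
  | zero =>
    intro rows hlen _
    rw [List.length_eq_zero_iff.mp hlen]
    simp [pvGoB]
  | succ n ih =>
    intro rows hlen h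
    match rows with
    | first :: rest =>
      have hfirst : 0 < first.length := h 0 (by simp)
      have hrest : ∀ i (hi : i < rest.length), i + 1 < rest[i].length := by
        intro i hi
        have := h (i + 1) (by simp; omega)
        simpa using this
      rw [pvGoB]
      have hsub := ih (rest.map (fun r => PySem.List.slice r (some (1 : Int)) none))
        (by simpa using hlen)
        (by
          intro i hi
          have hi' : i < rest.length := by simpa using hi
          have := hrest i hi'
          simp [PySem.List.slice_from_one]
          omega)
      rw [hsub]
      apply List.ext_getElem
      · simp [List.length_zipWith]
      · intro k hk1 hk2
        match k with
        | 0 =>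
          obtain ⟨a, tl, rfl⟩ : ∃ a tl, first = a :: tl := by
            cases first with
            | nil => simp at hfirst
            | cons a tl => exact ⟨a, tl, rfl⟩
          simp [PySem.List.slice_from_one, PySem.List.pyGetD, PySem.List.pyGet?, PySem.List.pyIdx?,
            List.modify]
        | k + 1 =>
          have hk : k < rest.length := by simpa using hk2
          have hne : 0 < rest[k].length := Nat.lt_of_le_of_lt (Nat.zero_le _) (hrest k hk)
          obtain ⟨a, tl, hr⟩ : ∃ a tl, rest[k] = a :: tl := by
            cases hrk : rest[k] with
            | nil => rw [hrk] at hne; simp at hne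
            | cons a tl => exact ⟨a, tl, rfl⟩
          simp only [List.getElem_cons_succ, List.getElem_zipWith, List.getElem_mapIdx,
            List.getElem_map, hr, PySem.List.slice_from_one]
          simp [PySem.List.pyGetD, PySem.List.pyGet?, PySem.List.pyIdx?, List.modify]

theorem pvGoB_eq_mapIdx (lamb : Int) (rows : List (List Int))
    (h : ∀ i (hi : i < rows.length), i < rows[i].length) :
    pvGoB lamb rows = rows.mapIdx (fun i r => r.modify i (fun v => v - lamb)) :=
  pvGoB_eq_mapIdx_aux lamb rows.length rows rfl h

theorem B_eq_mapIdx (M : List (List Int)) (lamb : Int)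
    (hpre : ∀ row ∈ M, M.length ≤ row.length) :
    A_Menos_lambda_alt M lamb =
      M.mapIdx (fun i row => (row.take M.length).modify i (fun v => v - lamb)) := by
  simp only [A_Menos_lambda_alt]
  rw [pvGoB_eq_mapIdx]
  · apply List.ext_getElem
    · simp
    · intro k hk1 hk2
      have hk : k < M.length := by simpa using hk2
      simp [PySem.List.slice_to_natCast]
  · intro i hi
    have hiM : i < M.length := by simpa using hi
    have := hpre M[i] (List.getElem_mem hiM)
    simp [PySem.List.slice_to_natCast, hiM]
    omega

-- ===== VERDICT =====
theorem A_Menos_lambda_spec : Claim_equal_A_Menos_lambda := by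
  intro M lamb _ hpre
  unfold Spec_A_Menos_lambda
  rw [A_eq_map, B_eq_mapIdx M lamb hpre]
  apply List.ext_getElem
  · simp
  · intro i hi1 hi2
    have hiM : i < M.length := by simpa using hi1
    have hrow : M.length ≤ M[i].length := hpre M[i] (List.getElem_mem hiM)
    have hrowget : PySem.List.pyGetD M (i : Int) ([] : List Int) = M[i] := by
      rw [PySem.List.pyGetD_natCast, List.getD_eq_getElem _ _ hiM]
    apply List.ext_getElem
    · simp [List.length_modify]; omega
    · intro j hj1 hj2
      have hjn : j < M.length := by simpa using hj1
      have hjr : j < M[i].length := lt_of_lt_of_le hjn hrow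
      simp only [List.getElem_map, List.getElem_range, List.getElem_mapIdx,
        List.getElem_modify, hrowget]
      rw [PySem.List.pyGetD_natCast, List.getD_eq_getElem _ _ hjr]
      by_cases h : i = j
      · subst h
        simp [List.getElem_take]
      · simp [h, List.getElem_take]
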